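-- pv_equiv track=rewrite | github.com/belluga/delphi-ai | tools/runtime_session_index.py | extract_block_field
-- ===== SOURCE A (Python) =====
-- def clean_value(raw: str) -> str:
--     value = raw.strip()
--     while len(value) >= 2 and value[0] == value[-1] and value[0] in {"`", '"', "'"}:
--         value = value[1:-1].strip()
--     return value or "n/a"
--
-- def extract_block_field(lines: list[str], section_heading: str, label: str) -> str:
--     start = None
--     for index, line in enumerate(lines):
--         if line.strip() == section_heading:
--             start = index + 1
--             break
--     if start is None:
--         return "n/a"
--
--     prefix = f"- **{label}:**"
--     for line in lines[start:]:
--         stripped = line.strip()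
--         if stripped.startswith("## ") and stripped != section_heading:
--             break
--         if stripped.startswith(prefix):
--             return clean_value(stripped[len(prefix) :])
--     return "n/a"
-- ===== SOURCE B (Python) =====
-- def clean_value(raw: str) -> str:
--     value = raw.strip()
--     while len(value) >= 2 and value[0] == value[-1] and value[0] in {"`", '"', "'"}:
--         value = value[1:-1].strip()
--     return value or "n/a"
--
-- def extract_block_field(lines: list[str], section_heading: str, label: str) -> str:
--     stripped = [line.strip() for line in lines]
--     if section_heading not in stripped:
--         return "n/a"
--     start = stripped.index(section_heading) + 1
--     prefix = f"- **{label}:**"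
--     n = len(stripped)
--     stop = next((i for i, s in enumerate(stripped)
--                  if i >= start and s.startswith("## ") and s != section_heading), n)
--     hit = next(((i, s) for i, s in enumerate(stripped)
--                 if i >= start and s.startswith(prefix)), None)
--     if hit is not None and hit[0] < stop:
--         return clean_value(hit[1][len(prefix):])
--     return "n/a"
-- ===== Notes on version B (the rewrite author's own statement) =====
-- stated objective: alternative
-- what changed: Replaced A's stateful scan (find the heading, then walk lines[start:] with break/return) by a table-and-index formulation: strip all lines once, compute the first index of the next different '## ' heading and the first index of a field line after the heading via two first-occurrence searches, and decide by comparing the two indices; clean_value is unchanged.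
import Mathlib
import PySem

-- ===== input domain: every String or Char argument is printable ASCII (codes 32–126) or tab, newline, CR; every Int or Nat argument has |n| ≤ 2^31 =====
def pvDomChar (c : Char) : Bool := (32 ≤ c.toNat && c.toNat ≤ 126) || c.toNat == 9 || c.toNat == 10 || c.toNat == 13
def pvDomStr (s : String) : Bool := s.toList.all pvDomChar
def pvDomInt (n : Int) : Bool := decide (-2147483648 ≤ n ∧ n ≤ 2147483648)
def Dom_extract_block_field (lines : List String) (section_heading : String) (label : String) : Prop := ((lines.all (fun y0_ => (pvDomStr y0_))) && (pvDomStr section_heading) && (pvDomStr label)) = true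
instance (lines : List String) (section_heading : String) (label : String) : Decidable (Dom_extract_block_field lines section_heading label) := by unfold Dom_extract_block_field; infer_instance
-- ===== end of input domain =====

-- B strips every line once into a table and then decides by comparing two first-occurrence
-- indices (next different '## ' heading vs field line) instead of A's stateful scan with
-- break/return; objective: alternative decomposition, same cost.

-- shared helper clean_value (identical in Source A and Source B); the while loop is ported
-- with a fuel counter = the string's length, which bounds the loop (each iteration
-- removes two characters), so the port computes exactly what the Python loop does.
def pvCleanGo : Nat → List Char → List Char
  | 0, v => v
  | fuel + 1, v =>
    if 2 ≤ v.length && v[0]? == v[v.length - 1]? &&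
        (v[0]? == some '`' || v[0]? == some '"' || v[0]? == some '\'') then
      pvCleanGo fuel (PySem.Chars.strip (PySem.List.slice v (some 1) (some (-1))))
    else v

def pvCleanValue (raw : List Char) : String :=
  let v := PySem.Chars.strip raw
  let r := pvCleanGo v.length v
  if r.isEmpty then "n/a" else String.ofList r

-- ===== PORT A =====
-- first loop of A: enumerate(lines), return index+1 of the first line whose strip equals the heading
def pvFindStartA (heading : List Char) : List String → Nat → Option Nat
  | [], _ => none
  | l :: rest, i =>
    if PySem.Chars.strip l.toList == heading then some (i + 1)
    else pvFindStartA heading rest (i + 1)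

-- second loop of A: over lines[start:]
def pvScanFields (pre heading : List Char) : List String → String
  | [] => "n/a"
  | l :: rest =>
    let s := PySem.Chars.strip l.toList
    if PySem.Chars.startswith s "## ".toList && !(s == heading) then "n/a"
    else if PySem.Chars.startswith s pre then pvCleanValue (s.drop pre.length)
    else pvScanFields pre heading rest

def extract_block_field (lines : List String) (section_heading : String) (label : String) : String :=
  match pvFindStartA section_heading.toList lines 0 with
  | none => "n/a"
  | some start =>
      pvScanFields ("- **".toList ++ label.toList ++ ":**".toList) section_heading.toList
        (PySem.List.slice lines (some (start : Int)) none)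

-- ===== PORT B =====
-- next((i for i, s in enumerate(stripped) if i >= start and s.startswith("## ") and s != section_heading), n)
def pvStop (heading : List Char) (start : Nat) : List (List Char) → Nat → Option Nat
  | [], _ => none
  | s :: rest, i =>
    if decide (start ≤ i) && PySem.Chars.startswith s "## ".toList && !(s == heading) then some i
    else pvStop heading start rest (i + 1)

-- next(((i, s) for i, s in enumerate(stripped) if i >= start and s.startswith(prefix)), None)
def pvHit (pre : List Char) (start : Nat) : List (List Char) → Nat → Option (Nat × List Char)
  | [], _ => none
  | s :: rest, i =>
    if decide (start ≤ i) && PySem.Chars.startswith s pre then some (i, s)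
    else pvHit pre start rest (i + 1)

def extract_block_field_alt (lines : List String) (section_heading : String) (label : String) : String :=
  let stripped := lines.map (fun l => PySem.Chars.strip l.toList)
  let hd := section_heading.toList
  if !(stripped.contains hd) then "n/a"
  else
    let start := (PySem.List.index? stripped hd).getD 0 + 1
    let pre := "- **".toList ++ label.toList ++ ":**".toList
    let n := stripped.length
    let stop := (pvStop hd start stripped 0).getD n
    match pvHit pre start stripped 0 with
    | some (i, s) => if i < stop then pvCleanValue (s.drop pre.length) else "n/a"
    | none => "n/a"

-- ===== PRECONDITION & SPEC =====
def Spec_extract_block_field (lines : List String) (section_heading : String) (label : String) (out : String) : Prop := out = extract_block_field_alt lines section_heading label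
instance (lines : List String) (section_heading : String) (label : String) (out : String) : Decidable (Spec_extract_block_field lines section_heading label out) := by unfold Spec_extract_block_field; infer_instance

-- ===== CLAIM (what is proved, stated in full; the proofs are below) =====
def Claim_equal_extract_block_field : Prop := ∀ (lines : List String) (section_heading : String) (label : String), Dom_extract_block_field lines section_heading label → Spec_extract_block_field lines section_heading label (extract_block_field lines section_heading label)

-- ===== LEMMAS AND PROOFS =====

-- A's scan, restated over the pre-stripped lines (bridge lemma below)
def pvScanS (pre heading : List Char) : List (List Char) → String
  | [] => "n/a"
  | s :: rest =>
    if PySem.Chars.startswith s "## ".toList && !(s == heading) then "n/a"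
    else if PySem.Chars.startswith s pre then pvCleanValue (s.drop pre.length)
    else pvScanS pre heading rest

lemma pvScanFields_eq_scanS (pre heading : List Char) :
    ∀ ls : List String, pvScanFields pre heading ls
      = pvScanS pre heading (ls.map (fun l => PySem.Chars.strip l.toList)) := by
  intro ls
  induction ls with
  | nil => rfl
  | cons a rest ih =>
      simp only [pvScanFields, pvScanS, List.map_cons]
      split_ifs <;> simp [ih]

lemma pvFindStartA_eq_index (heading : List Char) :
    ∀ (ls : List String) (i : Nat),
      pvFindStartA heading ls i
        = (PySem.List.index? (ls.map (fun l => PySem.Chars.strip l.toList)) heading).map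
            (fun k => k + i + 1) := by
  intro ls
  induction ls with
  | nil => intro i; rfl
  | cons a rest ih =>
      intro i
      simp only [pvFindStartA, List.map_cons]
      by_cases h : PySem.Chars.strip a.toList == heading
      · have he : PySem.Chars.strip a.toList = heading := by simpa using h
        rw [if_pos h, he, PySem.List.index?_cons_self]
        simp
      · have hne : PySem.Chars.strip a.toList ≠ heading := by simpa using h
        rw [if_neg h, PySem.List.index?_cons_of_ne _ hne, ih (i + 1)]
        cases PySem.List.index? (rest.map (fun l => PySem.Chars.strip l.toList)) heading with
        | none => rfl
        | some k => simp only [Option.map_some]; congr 1; omega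

lemma pvContains_eq_isSome {α : Type} [BEq α] [LawfulBEq α] (xs : List α) (v : α) :
    xs.contains v = (PySem.List.index? xs v).isSome := by
  by_cases h : v ∈ xs
  · rw [List.contains_iff_mem.mpr h, (PySem.List.index?_isSome_iff xs v).mpr h]
  · have h1 : xs.contains v = false := by simpa using h
    rw [h1, (PySem.List.index?_eq_none_iff xs v).mpr h]
    rfl

lemma pvIndex_lt_length {α : Type} [BEq α] [LawfulBEq α] (xs : List α) (v : α) (k : Nat)
    (h : PySem.List.index? xs v = some k) : k < xs.length := by
  obtain ⟨hk, _, _⟩ := PySem.List.getElem_of_index?_eq_some h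
  exact hk

lemma pvStop_ge (heading : List Char) (start : Nat) :
    ∀ (xs : List (List Char)) (j k : Nat), pvStop heading start xs j = some k → j ≤ k := by
  intro xs
  induction xs with
  | nil => intro j k h; exact absurd h (by simp [pvStop])
  | cons s rest ih =>
      intro j k h
      simp only [pvStop] at h
      split_ifs at h with hc
      · injection h with h'; omega
      · have := ih (j + 1) k h; omega

lemma pvHit_ge (pre : List Char) (start : Nat) :
    ∀ (xs : List (List Char)) (j : Nat) (k : Nat × List Char),
      pvHit pre start xs j = some k → j ≤ k.1 := by
  intro xs
  induction xs with
  | nil => intro j k h; exact absurd h (by simp [pvHit])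
  | cons s rest ih =>
      intro j k h
      simp only [pvHit] at h
      split_ifs at h with hc
      · cases h; simp
      · have := ih (j + 1) k h; omega

-- skipping the filtered-out indices: searching the whole table with the filter i ≥ start
-- equals searching the suffix starting at the counter
lemma pvStop_skip (heading : List Char) :
    ∀ (n : Nat) (xs : List (List Char)) (j : Nat),
      pvStop heading (j + n) xs j = pvStop heading (j + n) (xs.drop n) (j + n) := by
  intro n
  induction n with
  | zero => intro xs j; rfl
  | succ m ih =>
      intro xs j
      cases xs with
      | nil => simp [pvStop]
      | cons s rest =>
          have h1 : (decide (j + (m + 1) ≤ j) && PySem.Chars.startswith s "## ".toList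
              && !(s == heading)) = false := by
            simp
          simp only [pvStop, h1, Bool.false_eq_true, if_false, List.drop_succ_cons]
          have := ih rest (j + 1)
          rw [show j + (m + 1) = (j + 1) + m by omega] at *
          exact this

lemma pvHit_skip (pre : List Char) :
    ∀ (n : Nat) (xs : List (List Char)) (j : Nat),
      pvHit pre (j + n) xs j = pvHit pre (j + n) (xs.drop n) (j + n) := by
  intro n
  induction n with
  | zero => intro xs j; rfl
  | succ m ih =>
      intro xs j
      cases xs with
      | nil => simp [pvHit]
      | cons s rest =>
          have h1 : (decide (j + (m + 1) ≤ j) && PySem.Chars.startswith s pre) = false := by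
            simp
          simp only [pvHit, h1, Bool.false_eq_true, if_false, List.drop_succ_cons]
          have := ih rest (j + 1)
          rw [show j + (m + 1) = (j + 1) + m by omega] at *
          exact this

-- a line starting with "## " cannot start with the field prefix (which begins with '-')
lemma pvDisjoint (s rest : List Char)
    (h : PySem.Chars.startswith s "## ".toList = true) :
    PySem.Chars.startswith s ('-' :: rest) = false := by
  rw [PySem.Chars.startswith_iff] at h
  obtain ⟨t, ht⟩ := h
  by_contra hc
  have hc' : PySem.Chars.startswith s ('-' :: rest) = true := by
    cases hb : PySem.Chars.startswith s ('-' :: rest) with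
    | false => exact absurd hb hc
    | true => rfl
  rw [PySem.Chars.startswith_iff] at hc'
  obtain ⟨t', ht'⟩ := hc'
  rw [← ht] at ht'
  simp at ht'

-- main invariant: A's scan of the suffix equals B's index comparison, counter at j ≥ start
lemma pvMain (pre heading : List Char) (start : Nat) (rest0 : List Char)
    (hpre : pre = '-' :: rest0) :
    ∀ (xs : List (List Char)) (j : Nat), start ≤ j →
      pvScanS pre heading xs =
        (match pvHit pre start xs j with
         | some (i, s) =>
             if i < (pvStop heading start xs j).getD (j + xs.length) then
               pvCleanValue (s.drop pre.length)
             else "n/a"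
         | none => "n/a") := by
  intro xs
  induction xs with
  | nil => intro j hj; rfl
  | cons s rest ih =>
      intro j hj
      have hjd : decide (start ≤ j) = true := by simpa using hj
      by_cases hstop : (PySem.Chars.startswith s "## ".toList && !(s == heading)) = true
      · -- break line: stop = j, any later hit has index ≥ j + 1, so i < stop fails
        have h2 : PySem.Chars.startswith s "## ".toList = true := by
          revert hstop; cases PySem.Chars.startswith s "## ".toList <;> simp
        have hhit : PySem.Chars.startswith s pre = false := by
          rw [hpre]; exact pvDisjoint s rest0 h2
        simp only [pvScanS, pvStop, pvHit, hjd, Bool.true_and, hstop, hhit,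
          Bool.false_eq_true, if_true, if_false, Option.getD_some]
        cases hh : pvHit pre start rest (j + 1) with
        | none => rfl
        | some k =>
            have := pvHit_ge pre start rest (j + 1) k hh
            obtain ⟨i, s'⟩ := k
            simp only at this ⊢
            rw [if_neg (by omega)]
      · have hstop' : (PySem.Chars.startswith s "## ".toList && !(s == heading)) = false := by
          simpa using hstop
        by_cases hhit : PySem.Chars.startswith s pre = true
        · -- field line: hit = (j, s); stop is strictly greater than j
          simp only [pvScanS, pvStop, pvHit, hjd, Bool.true_and, hstop', hhit,
            Bool.false_eq_true, if_true, if_false, List.length_cons]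
          rw [if_pos ?_]
          cases hs : pvStop heading start rest (j + 1) with
          | none => simp only [Option.getD_none]; omega
          | some k =>
              have := pvStop_ge heading start rest (j + 1) k hs
              simp only [Option.getD_some]; omega
        · have hhit' : PySem.Chars.startswith s pre = false := by simpa using hhit
          simp only [pvScanS, pvStop, pvHit, hjd, Bool.true_and, hstop', hhit',
            Bool.false_eq_true, if_false, List.length_cons]
          have hlen : j + (rest.length + 1) = (j + 1) + rest.length := by omega
          rw [hlen]
          exact ih (j + 1) (by omega)

-- ===== VERDICT (by name: the statement is the Claim_ definition above) =====
theorem extract_block_field_spec : Claim_equal_extract_block_field := by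
  intro lines section_heading label _
  unfold Spec_extract_block_field extract_block_field extract_block_field_alt
  dsimp only
  rw [pvFindStartA_eq_index, pvContains_eq_isSome]
  cases hidx : PySem.List.index? (lines.map (fun l => PySem.Chars.strip l.toList))
      section_heading.toList with
  | none => simp
  | some k =>
      have hk : k < (lines.map (fun l => PySem.Chars.strip l.toList)).length :=
        pvIndex_lt_length _ _ k hidx
      simp only [Option.map_some, Option.isSome_some, Bool.not_true, Bool.false_eq_true,
        if_false, Option.getD_some]
      have hpre' : "- **".toList ++ label.toList ++ ":**".toList
          = '-' :: (" **".toList ++ label.toList ++ ":**".toList) := by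
        rw [show "- **".toList = '-' :: " **".toList from rfl]; simp
      rw [show ((k + 0 + 1 : Nat) : Int) = ((k + 1 : Nat) : Int) by push_cast; ring,
        PySem.List.slice_from_natCast, pvScanFields_eq_scanS, List.map_drop]
      have hskipS := pvStop_skip section_heading.toList (k + 1)
        (lines.map (fun l => PySem.Chars.strip l.toList)) 0
      have hskipH := pvHit_skip ("- **".toList ++ label.toList ++ ":**".toList) (k + 1)
        (lines.map (fun l => PySem.Chars.strip l.toList)) 0
      simp only [Nat.zero_add] at hskipS hskipH
      have hmain := pvMain ("- **".toList ++ label.toList ++ ":**".toList)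
        section_heading.toList (k + 1) _ hpre'
        ((lines.map (fun l => PySem.Chars.strip l.toList)).drop (k + 1)) (k + 1) (le_refl _)
      have hlen : (k + 1) + ((lines.map (fun l => PySem.Chars.strip l.toList)).drop (k + 1)).length
          = (lines.map (fun l => PySem.Chars.strip l.toList)).length := by
        rw [List.length_drop]; omega
      rw [hlen] at hmain
      rw [hmain, ← hskipS, ← hskipH]
      rfl
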